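-- pv_equiv track=rewrite | github.com/DanielDeBrem/FATRAG-naGROKerrors | scripts/fatrag_auto.py | choose_final
-- ===== SOURCE A (Python) =====
-- from typing import Any, Dict, List, Optional, Tuple
--
-- def choose_final(installed: List[str]) -> Optional[str]:
--     # Prefer 70B llama
--     for pat in ["llama3.1:70b-instruct", "llama3:70b-instruct", "llama3.1:70b", "llama3:70b"]:
--         for m in installed:
--             if m.startswith(pat) or pat in m:
--                 return m
--     # Next best: 34B/30B/13B
--     for size in ["34b", "30b", "13b"]:
--         for m in installed:
--             if "instruct" in m.lower() and size in m.lower():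
--                 return m
--     # Finally: any instruct bigger than 8b
--     for m in installed:
--         low = m.lower()
--         if "instruct" in low and any(s in low for s in ["13b", "34b", "30b"]):
--             return m
--     # Fallback to any instruct
--     for m in installed:
--         if "instruct" in m.lower():
--             return m
--     return installed[0] if installed else None
-- ===== SOURCE B (Python) =====
-- from typing import List, Optional
--
-- def choose_final(installed: List[str]) -> Optional[str]:
--     if not installed:
--         return None
--     pats = ["llama3.1:70b-instruct", "llama3:70b-instruct", "llama3.1:70b", "llama3:70b"]
--     sizes = ["34b", "30b", "13b"]
--
--     def rank(m: str) -> int: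
--         low = m.lower()
--         for i, p in enumerate(pats):
--             if p in m:
--                 return i
--         if "instruct" in low:
--             for i, s in enumerate(sizes):
--                 if s in low:
--                     return 4 + i
--             return 7
--         return 8
--
--     return min(installed, key=rank)
-- ===== Notes on version B (the rewrite author's own statement) =====
-- stated objective: simpler
-- what changed: A's four sequential priority passes over the list are replaced by a single min(installed, key=rank) with a per-element rank function (0-3 pattern index, 4-6 instruct+size index, 7 any instruct, 8 otherwise), relying on Python's first-minimizer tie-break; A's unreachable third tier is dropped.
import Mathlib
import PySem

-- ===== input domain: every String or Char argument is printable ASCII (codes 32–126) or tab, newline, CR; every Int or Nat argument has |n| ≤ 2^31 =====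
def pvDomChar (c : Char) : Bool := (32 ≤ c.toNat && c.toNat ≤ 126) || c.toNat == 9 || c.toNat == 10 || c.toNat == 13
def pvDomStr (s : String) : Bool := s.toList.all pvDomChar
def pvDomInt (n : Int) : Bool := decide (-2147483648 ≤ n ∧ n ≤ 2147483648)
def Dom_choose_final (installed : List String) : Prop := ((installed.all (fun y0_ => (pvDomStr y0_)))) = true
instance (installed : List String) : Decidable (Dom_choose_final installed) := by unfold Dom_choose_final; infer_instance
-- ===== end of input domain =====

-- B replaces A's four sequential priority passes by a single min(installed, key=rank) with a one-pass rank function (objective: simpler).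

-- ===== PORT A =====
def pvPats : List String := ["llama3.1:70b-instruct", "llama3:70b-instruct", "llama3.1:70b", "llama3:70b"]

def pvSizes : List String := ["34b", "30b", "13b"]

-- 'for pat in …: for m in installed: if …: return m'
def pvTier1 : List String → List String → Option String
  | [], _ => none
  | p :: ps, installed =>
    match installed.find? (fun m => PySem.Str.startswith m p || PySem.Str.isIn p m) with
    | some m => some m
    | none => pvTier1 ps installed

def pvTier2 : List String → List String → Option String
  | [], _ => none
  | s :: ss, installed =>
    match installed.find? (fun m =>
        PySem.Str.isIn "instruct" (PySem.Str.lower m) && PySem.Str.isIn s (PySem.Str.lower m)) with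
    | some m => some m
    | none => pvTier2 ss installed

def choose_final (installed : List String) : Option String :=
  match pvTier1 pvPats installed with
  | some m => some m
  | none =>
  match pvTier2 pvSizes installed with
  | some m => some m
  | none =>
  match installed.find? (fun m =>
      let low := PySem.Str.lower m
      PySem.Str.isIn "instruct" low && (["13b", "34b", "30b"].any (fun s => PySem.Str.isIn s low))) with
  | some m => some m
  | none =>
  match installed.find? (fun m => PySem.Str.isIn "instruct" (PySem.Str.lower m)) with
  | some m => some m
  | none => match installed with
    | [] => none
    | x :: _ => some x

-- ===== PORT B =====
def pvPatsB : List String := ["llama3.1:70b-instruct", "llama3:70b-instruct", "llama3.1:70b", "llama3:70b"]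

def pvSizesB : List String := ["34b", "30b", "13b"]

-- 'for i, p in enumerate(l): if p in m: return i' (as an index search)
def pvIdxIn : List String → Nat → String → Option Nat
  | [], _, _ => none
  | p :: ps, i, m => if PySem.Str.isIn p m then some i else pvIdxIn ps (i + 1) m

def pvRank (m : String) : Nat :=
  let low := PySem.Str.lower m
  match pvIdxIn pvPatsB 0 m with
  | some i => i
  | none =>
    if PySem.Str.isIn "instruct" low then
      match pvIdxIn pvSizesB 0 low with
      | some i => 4 + i
      | none => 7
    else 8

def choose_final_alt (installed : List String) : Option String :=
  match installed with
  | [] => none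
  | x :: _ => some (PySem.List.minD installed pvRank x)

-- ===== PRECONDITION & SPEC =====
def Spec_choose_final (installed : List String) (out : Option String) : Prop := out = choose_final_alt installed
instance (installed : List String) (out : Option String) : Decidable (Spec_choose_final installed out) := by unfold Spec_choose_final; infer_instance

-- ===== CLAIM (what is proved, stated in full; the proofs are below) =====
def Claim_equal_choose_final : Prop := ∀ (installed : List String), Dom_choose_final installed → Spec_choose_final installed (choose_final installed)

-- ===== LEMMAS AND PROOFS =====

-- A's 'm.startswith(pat) or pat in m' is just 'pat in m'
theorem pv_sw_or_isIn (p m : String) :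
    (PySem.Str.startswith m p || PySem.Str.isIn p m) = PySem.Str.isIn p m := by
  cases h : PySem.Str.startswith m p with
  | false => simp
  | true =>
    have hpre : p.toList <+: m.toList := by
      have := PySem.Str.startswith_eq m p
      rw [h] at this
      exact (PySem.Chars.startswith_iff _ _).mp this.symm
    have hIn : PySem.Chars.isIn p.toList m.toList = true := by
      simpa using (PySem.Str.isIn_iff_infix p m).mpr hpre.isInfix
    simp [hIn]

-- shorthand for the eight boolean tests (proof-side only)
def pvB0 (m : String) : Bool := PySem.Str.isIn "llama3.1:70b-instruct" m
def pvB1 (m : String) : Bool := PySem.Str.isIn "llama3:70b-instruct" m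
def pvB2 (m : String) : Bool := PySem.Str.isIn "llama3.1:70b" m
def pvB3 (m : String) : Bool := PySem.Str.isIn "llama3:70b" m
def pvIns (m : String) : Bool := PySem.Str.isIn "instruct" (PySem.Str.lower m)
def pvS34 (m : String) : Bool := PySem.Str.isIn "34b" (PySem.Str.lower m)
def pvS30 (m : String) : Bool := PySem.Str.isIn "30b" (PySem.Str.lower m)
def pvS13 (m : String) : Bool := PySem.Str.isIn "13b" (PySem.Str.lower m)

theorem pvRank_eq (m : String) :
    pvRank m =
      if pvB0 m then 0 else if pvB1 m then 1 else if pvB2 m then 2 else if pvB3 m then 3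
      else if pvIns m then (if pvS34 m then 4 else if pvS30 m then 5 else if pvS13 m then 6 else 7)
      else 8 := by
  simp only [pvRank, pvIdxIn, pvPatsB, pvSizesB, pvB0, pvB1, pvB2, pvB3, pvIns, pvS34, pvS30, pvS13]
  split_ifs <;> simp_all

theorem pvRank_le_eight (m : String) : pvRank m ≤ 8 := by
  rw [pvRank_eq]; split_ifs <;> omega

theorem pvRank_of_b0 (m : String) (h : pvB0 m = true) : pvRank m = 0 := by
  rw [pvRank_eq]; split_ifs <;> simp_all
theorem pvRank_of_b1 (m : String) (h : pvB1 m = true) : pvRank m ≤ 1 := by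
  rw [pvRank_eq]; split_ifs <;> omega
theorem pvRank_of_b2 (m : String) (h : pvB2 m = true) : pvRank m ≤ 2 := by
  rw [pvRank_eq]; split_ifs <;> omega
theorem pvRank_of_b3 (m : String) (h : pvB3 m = true) : pvRank m ≤ 3 := by
  rw [pvRank_eq]; split_ifs <;> omega
theorem pvRank_of_s34 (m : String) (h1 : pvIns m = true) (h2 : pvS34 m = true) : pvRank m ≤ 4 := by
  rw [pvRank_eq]; split_ifs <;> omega
theorem pvRank_of_s30 (m : String) (h1 : pvIns m = true) (h2 : pvS30 m = true) : pvRank m ≤ 5 := by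
  rw [pvRank_eq]; split_ifs <;> omega
theorem pvRank_of_s13 (m : String) (h1 : pvIns m = true) (h2 : pvS13 m = true) : pvRank m ≤ 6 := by
  rw [pvRank_eq]; split_ifs <;> omega
theorem pvRank_of_ins (m : String) (h : pvIns m = true) : pvRank m ≤ 7 := by
  rw [pvRank_eq]; split_ifs <;> omega

theorem pvRank0 (m : String) (h : pvRank m = 0) : pvB0 m = true := by
  rw [pvRank_eq] at h; by_contra hc; simp only [Bool.not_eq_true] at hc
  rw [hc] at h; split_ifs at h <;> omega
theorem pvRank1 (m : String) (h : pvRank m = 1) : pvB1 m = true := by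
  rw [pvRank_eq] at h; by_contra hc; simp only [Bool.not_eq_true] at hc
  split_ifs at h <;> simp_all
theorem pvRank2 (m : String) (h : pvRank m = 2) : pvB2 m = true := by
  rw [pvRank_eq] at h; by_contra hc; simp only [Bool.not_eq_true] at hc
  split_ifs at h <;> simp_all
theorem pvRank3 (m : String) (h : pvRank m = 3) : pvB3 m = true := by
  rw [pvRank_eq] at h; by_contra hc; simp only [Bool.not_eq_true] at hc
  split_ifs at h <;> simp_all
theorem pvRank4 (m : String) (h : pvRank m = 4) : pvIns m = true ∧ pvS34 m = true := by
  rw [pvRank_eq] at h; split_ifs at h <;> simp_all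
theorem pvRank5 (m : String) (h : pvRank m = 5) : pvIns m = true ∧ pvS30 m = true := by
  rw [pvRank_eq] at h; split_ifs at h <;> simp_all
theorem pvRank6 (m : String) (h : pvRank m = 6) : pvIns m = true ∧ pvS13 m = true := by
  rw [pvRank_eq] at h; split_ifs at h <;> simp_all
theorem pvRank7 (m : String) (h : pvRank m = 7) : pvIns m = true := by
  rw [pvRank_eq] at h; split_ifs at h <;> simp_all

-- first-minimizer foldl characterisation of PySem.List.min?
theorem pv_min?_foldl_some {α : Type} (k : α → Nat) (xs : List α) :
    ∀ a : α,
      List.foldl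
        (fun acc x =>
          match acc with
          | none => some x
          | some m => if k x < k m then some x else some m)
        (some a) xs =
      some (match PySem.List.min? xs k with
            | none => a
            | some y => if k y < k a then y else a) := by
  induction xs with
  | nil => intro a; simp [PySem.List.min?]
  | cons z zs ih =>
    intro a
    have hz : PySem.List.min? (z :: zs) k =
        some (match PySem.List.min? zs k with
              | none => z
              | some y => if k y < k z then y else z) := by
      simpa [PySem.List.min?] using ih z
    have hstep : List.foldl
        (fun acc x =>
          match acc with
          | none => some x
          | some m => if k x < k m then some x else some m)
        (some a) (z :: zs) =
        List.foldl
        (fun acc x =>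
          match acc with
          | none => some x
          | some m => if k x < k m then some x else some m)
        (some (if k z < k a then z else a)) zs := by
      simp only [List.foldl_cons]
      split_ifs <;> rfl
    rw [hstep, ih (if k z < k a then z else a), hz]
    cases hm : PySem.List.min? zs k with
    | none => simp only [hm]
    | some y => simp only [hm]; split_ifs <;> first | rfl | omega

theorem pv_min?_cons {α : Type} (k : α → Nat) (x : α) (xs : List α) :
    PySem.List.min? (x :: xs) k =
      some (match PySem.List.min? xs k with
            | none => x
            | some y => if k y < k x then y else x) := by
  simpa [PySem.List.min?] using pv_min?_foldl_some k xs x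

theorem pv_min?_first {α : Type} (k : α → Nat) :
    ∀ (l : List α) (y : α), PySem.List.min? l k = some y →
      ∃ l₁ l₂, l = l₁ ++ y :: l₂ ∧ ∀ z ∈ l₁, k y < k z := by
  intro l
  induction l with
  | nil => intro y h; simp [PySem.List.min?] at h
  | cons x xs ih =>
    intro y h
    rw [pv_min?_cons] at h
    cases hm : PySem.List.min? xs k with
    | none =>
      rw [hm] at h; simp at h
      exact ⟨[], xs, by simp [h], by simp⟩
    | some y' =>
      rw [hm] at h; simp at h
      by_cases hlt : k y' < k x
      · rw [if_pos hlt] at h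
        subst h
        obtain ⟨l₁, l₂, hsplit, hfirst⟩ := ih y' hm
        exact ⟨x :: l₁, l₂, by simp [hsplit], by
          intro z hz
          rcases List.mem_cons.mp hz with rfl | hz'
          · exact hlt
          · exact hfirst z hz'⟩
      · rw [if_neg hlt] at h
        subst h
        exact ⟨[], xs, by simp, by simp⟩

-- ===== main proof =====
theorem pv_main (installed : List String) :
    choose_final installed = choose_final_alt installed := by
  cases installed with
  | nil => simp [choose_final, choose_final_alt, pvTier1, pvTier2, pvPats, pvSizes]
  | cons x xs =>
    have hne : x :: xs ≠ [] := by simp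
    obtain ⟨y, hy⟩ : ∃ y, PySem.List.min? (x :: xs) pvRank = some y :=
      ⟨_, PySem.List.min?_eq_some_minD (x :: xs) pvRank x hne⟩
    have hBalt : choose_final_alt (x :: xs) = some y := by
      have hd : PySem.List.minD (x :: xs) pvRank x = y := by
        simp [PySem.List.minD, hy]
      simp [choose_final_alt, hd]
    have hmin : ∀ z ∈ x :: xs, pvRank y ≤ pvRank z := PySem.List.min?_isMin hy
    obtain ⟨l₁, l₂, hsplit, hfirst⟩ := pv_min?_first pvRank (x :: xs) y hy
    have hy8 : pvRank y ≤ 8 := pvRank_le_eight y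
    rw [hBalt]
    have hnone : ∀ (p : String → Bool) (j : Nat), (∀ z, p z = true → pvRank z ≤ j) →
        j < pvRank y → List.find? p (x :: xs) = none := by
      intro p j hp hj
      refine List.find?_eq_none.mpr (fun z hz hpz => ?_)
      have h1 := hmin z hz
      have h2 := hp z hpz
      omega
    have hsome : ∀ (p : String → Bool), p y = true →
        (∀ z, p z = true → pvRank z ≤ pvRank y) → List.find? p (x :: xs) = some y := by
      intro p hpy hp
      rw [hsplit, List.find?_append]
      have h1 : List.find? p l₁ = none :=
        List.find?_eq_none.mpr (fun z hz hpz => by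
          have h2 := hfirst z hz
          have h3 := hp z hpz
          omega)
      simp [h1, List.find?_cons_of_pos hpy]
    have bnd0 : ∀ z : String, PySem.Str.isIn "llama3.1:70b-instruct" z = true → pvRank z ≤ 0 :=
      fun z hz => Nat.le_of_eq (pvRank_of_b0 z hz)
    have bnd1 : ∀ z : String, PySem.Str.isIn "llama3:70b-instruct" z = true → pvRank z ≤ 1 :=
      fun z hz => pvRank_of_b1 z hz
    have bnd2 : ∀ z : String, PySem.Str.isIn "llama3.1:70b" z = true → pvRank z ≤ 2 :=
      fun z hz => pvRank_of_b2 z hz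
    have bnd3 : ∀ z : String, PySem.Str.isIn "llama3:70b" z = true → pvRank z ≤ 3 :=
      fun z hz => pvRank_of_b3 z hz
    have bnd34 : ∀ z : String,
        (PySem.Str.isIn "instruct" (PySem.Str.lower z) && PySem.Str.isIn "34b" (PySem.Str.lower z)) = true →
        pvRank z ≤ 4 := fun z hz => by
      rw [Bool.and_eq_true] at hz; exact pvRank_of_s34 z hz.1 hz.2
    have bnd30 : ∀ z : String,
        (PySem.Str.isIn "instruct" (PySem.Str.lower z) && PySem.Str.isIn "30b" (PySem.Str.lower z)) = true →
        pvRank z ≤ 5 := fun z hz => by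
      rw [Bool.and_eq_true] at hz; exact pvRank_of_s30 z hz.1 hz.2
    have bnd13 : ∀ z : String,
        (PySem.Str.isIn "instruct" (PySem.Str.lower z) && PySem.Str.isIn "13b" (PySem.Str.lower z)) = true →
        pvRank z ≤ 6 := fun z hz => by
      rw [Bool.and_eq_true] at hz; exact pvRank_of_s13 z hz.1 hz.2
    have bndT3 : ∀ z : String,
        (PySem.Str.isIn "instruct" (PySem.Str.lower z) &&
          (["13b", "34b", "30b"].any (fun s => PySem.Str.isIn s (PySem.Str.lower z)))) = true →
        pvRank z ≤ 6 := fun z hz => by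
      rw [Bool.and_eq_true] at hz
      obtain ⟨hi, ha⟩ := hz
      simp only [List.any_cons, List.any_nil, Bool.or_eq_true, Bool.or_false] at ha
      rcases ha with h13 | h34 | h30
      · exact pvRank_of_s13 z hi h13
      · exact le_trans (pvRank_of_s34 z hi h34) (by omega)
      · exact le_trans (pvRank_of_s30 z hi h30) (by omega)
    have bndIns : ∀ z : String, PySem.Str.isIn "instruct" (PySem.Str.lower z) = true → pvRank z ≤ 7 :=
      fun z hz => pvRank_of_ins z hz
    have hcase : pvRank y = 0 ∨ pvRank y = 1 ∨ pvRank y = 2 ∨ pvRank y = 3 ∨ pvRank y = 4 ∨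
        pvRank y = 5 ∨ pvRank y = 6 ∨ pvRank y = 7 ∨ pvRank y = 8 := by omega
    simp only [choose_final, pvTier1, pvTier2, pvPats, pvSizes, pv_sw_or_isIn]
    rcases hcase with h | h | h | h | h | h | h | h | h
    · rw [hsome (fun m => PySem.Str.isIn "llama3.1:70b-instruct" m) (by simpa [pvB0] using pvRank0 y h) (fun z hz => by have := bnd0 z hz; omega)]
    · rw [hnone _ 0 bnd0 (by omega), hsome (fun m => PySem.Str.isIn "llama3:70b-instruct" m) (by simpa [pvB1] using pvRank1 y h) (fun z hz => by have := bnd1 z hz; omega)]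
    · rw [hnone _ 0 bnd0 (by omega), hnone _ 1 bnd1 (by omega),
        hsome (fun m => PySem.Str.isIn "llama3.1:70b" m) (by simpa [pvB2] using pvRank2 y h) (fun z hz => by have := bnd2 z hz; omega)]
    · rw [hnone _ 0 bnd0 (by omega), hnone _ 1 bnd1 (by omega), hnone _ 2 bnd2 (by omega),
        hsome (fun m => PySem.Str.isIn "llama3:70b" m) (by simpa [pvB3] using pvRank3 y h) (fun z hz => by have := bnd3 z hz; omega)]
    · rw [hnone _ 0 bnd0 (by omega), hnone _ 1 bnd1 (by omega), hnone _ 2 bnd2 (by omega),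
        hnone _ 3 bnd3 (by omega),
        hsome (fun m => PySem.Str.isIn "instruct" (PySem.Str.lower m) && PySem.Str.isIn "34b" (PySem.Str.lower m)) (by have h4 := pvRank4 y h; simp only [pvIns, pvS34] at h4; rw [Bool.and_eq_true]; exact ⟨h4.1, h4.2⟩) (fun z hz => by have := bnd34 z hz; omega)]
    · rw [hnone _ 0 bnd0 (by omega), hnone _ 1 bnd1 (by omega), hnone _ 2 bnd2 (by omega),
        hnone _ 3 bnd3 (by omega), hnone _ 4 bnd34 (by omega),
        hsome (fun m => PySem.Str.isIn "instruct" (PySem.Str.lower m) && PySem.Str.isIn "30b" (PySem.Str.lower m)) (by have h5 := pvRank5 y h; simp only [pvIns, pvS30] at h5; rw [Bool.and_eq_true]; exact ⟨h5.1, h5.2⟩) (fun z hz => by have := bnd30 z hz; omega)]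
    · rw [hnone _ 0 bnd0 (by omega), hnone _ 1 bnd1 (by omega), hnone _ 2 bnd2 (by omega),
        hnone _ 3 bnd3 (by omega), hnone _ 4 bnd34 (by omega), hnone _ 5 bnd30 (by omega),
        hsome (fun m => PySem.Str.isIn "instruct" (PySem.Str.lower m) && PySem.Str.isIn "13b" (PySem.Str.lower m)) (by have h6 := pvRank6 y h; simp only [pvIns, pvS13] at h6; rw [Bool.and_eq_true]; exact ⟨h6.1, h6.2⟩) (fun z hz => by have := bnd13 z hz; omega)]
    · rw [hnone _ 0 bnd0 (by omega), hnone _ 1 bnd1 (by omega), hnone _ 2 bnd2 (by omega),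
        hnone _ 3 bnd3 (by omega), hnone _ 4 bnd34 (by omega), hnone _ 5 bnd30 (by omega),
        hnone _ 6 bnd13 (by omega), hnone _ 6 bndT3 (by omega),
        hsome (fun m => PySem.Str.isIn "instruct" (PySem.Str.lower m)) (by simpa [pvIns] using pvRank7 y h) (fun z hz => by have := bndIns z hz; omega)]
    · rw [hnone _ 0 bnd0 (by omega), hnone _ 1 bnd1 (by omega), hnone _ 2 bnd2 (by omega),
        hnone _ 3 bnd3 (by omega), hnone _ 4 bnd34 (by omega), hnone _ 5 bnd30 (by omega),
        hnone _ 6 bnd13 (by omega), hnone _ 6 bndT3 (by omega), hnone _ 7 bndIns (by omega)]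
      have hl1 : l₁ = [] := by
        cases l₁ with
        | nil => rfl
        | cons z l' =>
          have h2 := hfirst z (by simp)
          have h3 := pvRank_le_eight z
          omega
      have hx : x = y := by
        rw [hl1] at hsplit
        simp only [List.nil_append, List.cons.injEq] at hsplit
        exact hsplit.1
      exact congrArg some hx

-- ===== VERDICT (by name: the statement is the Claim_ definition above) =====
theorem choose_final_spec : Claim_equal_choose_final := by
  intro installed _
  unfold Spec_choose_final
  exact pv_main installed
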